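-- pv_equiv track=rewrite | github.com/theohern/Checkers | checkers.py | FilterMovesPawn
-- ===== SOURCE A (Python) =====
-- def FilterMovesPawn(moves):
--     FinalMoves = []
--     maximum = 0
--     for m in moves :
--         count = 0
--         if isinstance(m, list) : count += 1
--         count += len(m)
--         if count > maximum:
--             maximum = count
--             FinalMoves.clear()
--             FinalMoves.append(m)
--         elif count == maximum:
--             FinalMoves.append(m)
--     return FinalMoves
-- ===== SOURCE B (Python) =====
-- def FilterMovesPawn(moves):
--     counts = [len(m) + (1 if isinstance(m, list) else 0) for m in moves]
--     if not counts:
--         return []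
--     mx = max(counts)
--     return [m for m, c in zip(moves, counts) if c == mx]
-- ===== Notes on version B (the rewrite author's own statement) =====
-- stated objective: simpler
-- what changed: Replaces the single-pass running-maximum loop with clear/append bookkeeping by a two-pass shape: compute all count values, take their max, then filter the moves whose count equals it.
import Mathlib
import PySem

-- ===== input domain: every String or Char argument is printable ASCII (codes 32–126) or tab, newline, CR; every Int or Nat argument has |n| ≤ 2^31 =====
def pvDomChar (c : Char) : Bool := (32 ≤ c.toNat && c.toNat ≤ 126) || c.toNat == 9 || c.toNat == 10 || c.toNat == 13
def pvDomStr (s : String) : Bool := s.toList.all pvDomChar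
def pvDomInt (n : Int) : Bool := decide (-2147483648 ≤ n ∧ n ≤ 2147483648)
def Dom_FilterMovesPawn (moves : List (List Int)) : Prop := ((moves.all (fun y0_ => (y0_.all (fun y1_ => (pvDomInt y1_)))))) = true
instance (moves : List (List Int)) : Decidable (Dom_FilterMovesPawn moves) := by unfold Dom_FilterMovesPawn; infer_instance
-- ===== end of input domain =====

-- B replaces A's single-pass running-maximum loop with clear/append bookkeeping by compute-all-counts, max, filter (objective: simpler).

-- ===== PORT A =====
-- A's for-loop over moves with state (FinalMoves, maximum); every m : List Int, so `isinstance(m, list)` is True.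
def FilterMovesPawnLoop : List (List Int) → List (List Int) → Int → List (List Int)
  | [], finalMoves, _ => finalMoves
  | m :: rest, finalMoves, maximum =>
    let count : Int := 0
    let count := count + 1          -- isinstance(m, list) always holds here
    let count := count + (m.length : Int)
    if count > maximum then
      FilterMovesPawnLoop rest [m] count
    else if count = maximum then
      FilterMovesPawnLoop rest (finalMoves ++ [m]) maximum
    else
      FilterMovesPawnLoop rest finalMoves maximum

def FilterMovesPawn (moves : List (List Int)) : List (List Int) :=
  FilterMovesPawnLoop moves [] 0

-- ===== PORT B =====
def FilterMovesPawn_alt (moves : List (List Int)) : List (List Int) :=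
  let counts := moves.map (fun m => (m.length : Int) + 1)   -- len(m) + 1 (isinstance always true)
  match PySem.List.max? counts (fun x => x) with
  | none => []
  | some mx => ((moves.zip counts).filter (fun p => p.2 = mx)).map Prod.fst

-- ===== PRECONDITION & SPEC =====
def Spec_FilterMovesPawn (moves : List (List Int)) (out : List (List Int)) : Prop := out = FilterMovesPawn_alt moves
instance (moves : List (List Int)) (out : List (List Int)) : Decidable (Spec_FilterMovesPawn moves out) := by unfold Spec_FilterMovesPawn; infer_instance

-- ===== CLAIM (what is proved, stated in full; the proofs are below) =====
def Claim_equal_FilterMovesPawn : Prop := ∀ (moves : List (List Int)), Dom_FilterMovesPawn moves → Spec_FilterMovesPawn moves (FilterMovesPawn moves)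

-- ===== LEMMAS AND PROOFS =====

-- the count of a move
def pvCnt (m : List Int) : Int := (m.length : Int) + 1

lemma foldl_max_ge (t : List (List Int)) : ∀ init : Int,
    init ≤ List.foldl (fun a x => max a (pvCnt x)) init t := by
  induction t with
  | nil => intro init; simp
  | cons y s ihs =>
    intro init
    simp only [List.foldl_cons]
    exact le_trans (le_max_left _ _) (ihs _)

-- characterisation of A's loop: result = (kept prefix if the max does not grow) ++ the maximal tail elements
lemma loopA_eq (xs : List (List Int)) : ∀ (fm : List (List Int)) (mx : Int),
    FilterMovesPawnLoop xs fm mx =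
      (if List.foldl (fun a x => max a (pvCnt x)) mx xs = mx then fm else [])
        ++ xs.filter (fun x => pvCnt x = List.foldl (fun a x => max a (pvCnt x)) mx xs) := by
  induction xs with
  | nil => intro fm mx; simp [FilterMovesPawnLoop]
  | cons m rest ih =>
    intro fm mx
    have hc : (0 : Int) + 1 + (m.length : Int) = pvCnt m := by unfold pvCnt; ring
    simp only [FilterMovesPawnLoop, hc, List.foldl_cons, List.filter_cons]
    rcases lt_trichotomy mx (pvCnt m) with h | h | h
    · -- count > maximum : clear and restart
      rw [if_pos h, ih [m] (pvCnt m)]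
      have hstep : max mx (pvCnt m) = pvCnt m := max_eq_right (le_of_lt h)
      simp only [hstep]
      have hMge : pvCnt m ≤ List.foldl (fun a x => max a (pvCnt x)) (pvCnt m) rest :=
        foldl_max_ge rest _
      generalize hF : List.foldl (fun a x => max a (pvCnt x)) (pvCnt m) rest = F at hMge ⊢
      have hne : F ≠ mx := by omega
      by_cases hm : pvCnt m = F
      · simp [hm, hne]
      · simp [hm, hne, Ne.symm hm]
    · -- count == maximum : append
      rw [if_neg (by omega), if_pos h.symm, ih (fm ++ [m]) mx]
      have hstep : max mx (pvCnt m) = mx := max_eq_left (le_of_eq h.symm)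
      simp only [hstep]
      have hMge : mx ≤ List.foldl (fun a x => max a (pvCnt x)) mx rest := foldl_max_ge rest _
      generalize hF : List.foldl (fun a x => max a (pvCnt x)) mx rest = F at hMge ⊢
      by_cases hfm : F = mx
      · have hm : pvCnt m = F := by omega
        simp [hfm, hm]
      · have hm : pvCnt m ≠ F := by omega
        simp [hfm, hm]
    · -- count < maximum : skip
      rw [if_neg (by omega), if_neg (by omega), ih fm mx]
      have hstep : max mx (pvCnt m) = mx := max_eq_left (le_of_lt h)
      simp only [hstep]
      have hMge : mx ≤ List.foldl (fun a x => max a (pvCnt x)) mx rest := foldl_max_ge rest _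
      generalize hF : List.foldl (fun a x => max a (pvCnt x)) mx rest = F at hMge ⊢
      have hm : pvCnt m ≠ F := by omega
      simp [hm]

-- the zip-filter-map in B is a plain filter on moves
lemma zip_filter_map (mx : Int) : ∀ (moves : List (List Int)) (cs : List Int),
    cs = moves.map (fun m => (m.length : Int) + 1) →
    (((moves.zip cs).filter (fun p => p.2 = mx)).map Prod.fst)
      = moves.filter (fun m => pvCnt m = mx) := by
  intro moves
  induction moves with
  | nil => intro cs h; subst h; simp
  | cons m rest ih =>
    intro cs h; subst h
    simp only [List.map_cons, List.zip_cons_cons, List.filter_cons]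
    by_cases hm : ((m.length : Int) + 1) = mx
    · simp [hm, pvCnt, ih _ rfl]
    · simp [hm, pvCnt, ih _ rfl]

-- ===== VERDICT (by name: the statement is the Claim_ definition above) =====
theorem FilterMovesPawn_spec : Claim_equal_FilterMovesPawn := by
  intro moves _
  unfold Spec_FilterMovesPawn FilterMovesPawn FilterMovesPawn_alt
  cases moves with
  | nil => rfl
  | cons m rest =>
    rw [loopA_eq]
    simp only [List.map_cons, PySem.List.max?_id_cons]
    rw [zip_filter_map _ (m :: rest) (((m.length : Int) + 1) :: rest.map (fun m => (m.length : Int) + 1)) (by simp)]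
    have h0 : max 0 (pvCnt m) = pvCnt m := by unfold pvCnt; omega
    have hfold : List.foldl max ((m.length : Int) + 1) (rest.map (fun m => (m.length : Int) + 1))
        = List.foldl (fun a x => max a (pvCnt x)) 0 (m :: rest) := by
      simp only [List.foldl_cons, h0, List.foldl_map]
      rfl
    have hge : (1 : Int) ≤ List.foldl (fun a x => max a (pvCnt x)) 0 (m :: rest) := by
      have h1 : (1 : Int) ≤ pvCnt m := by unfold pvCnt; omega
      have := foldl_max_ge rest (pvCnt m)
      simp only [List.foldl_cons, h0]
      omega
    rw [if_neg (by omega), hfold]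
    simp
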